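-- pv_equiv track=rewrite | github.com/StjepanPrakljacic/PEP8-parser | Scripts/corrective_actions.py | remove_whitespace_and_count
-- ===== SOURCE A (Python) =====
-- def remove_whitespace_and_count(s, start_index):
--     """
--     Remove consecutive whitespaces from a string starting from the given index.
--
--     Args:
--         s(str): The input string.
--         start_index(int): The starting index for whitespace removal.
--
--     Returns:
--         tuple: A tuple containing the modified line with removed whitespaces
--                and the count of deleted whitespaces.
--     """
--     count = 0
--     end_index = start_index
--     while end_index < len(s) and s[end_index].isspace():
--         count += 1
--         end_index += 1
--
--     modified_line = (
--         s[:start_index]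
--         + s[start_index:end_index].replace(" ", "")
--         + s[end_index:])
--
--     return modified_line, count
-- ===== SOURCE B (Python) =====
-- def remove_whitespace_and_count(s, start_index):
--     """Single pass over the whole string as a state machine: each character is
--     kept or dropped on the fly (no slicing, no run-boundary search).  A char is
--     dropped iff it is a ' ' inside the still-open whitespace run that begins at
--     start_index; `run` closes at the first non-whitespace char at or past it."""
--     out = []
--     count = 0
--     run = True
--     for i, c in enumerate(s):
--         if i < start_index:
--             out.append(c)
--         elif run and c.isspace():
--             count += 1
--             if c != ' ':
--                 out.append(c)
--         else:
--             run = False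
--             out.append(c)
--     return ''.join(out), count
-- ===== Notes on version B (the rewrite author's own statement) =====
-- stated objective: alternative
-- what changed: Replaces A's find-the-run-then-slice-and-splice approach (scan for end_index, then assemble s[:start]+run.replace(' ','')+s[end:]) with a single pass over the whole string as a per-character state machine that decides keep/drop for each character on the fly, never slicing s.
-- outside the precondition, e.g. on remove_whitespace_and_count(' x ', -1): A returns (' xx ', 2), B returns ('x ', 1); on remove_whitespace_and_count('ab', -5): A raises IndexError, B returns ('ab', 0)
import Mathlib
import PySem

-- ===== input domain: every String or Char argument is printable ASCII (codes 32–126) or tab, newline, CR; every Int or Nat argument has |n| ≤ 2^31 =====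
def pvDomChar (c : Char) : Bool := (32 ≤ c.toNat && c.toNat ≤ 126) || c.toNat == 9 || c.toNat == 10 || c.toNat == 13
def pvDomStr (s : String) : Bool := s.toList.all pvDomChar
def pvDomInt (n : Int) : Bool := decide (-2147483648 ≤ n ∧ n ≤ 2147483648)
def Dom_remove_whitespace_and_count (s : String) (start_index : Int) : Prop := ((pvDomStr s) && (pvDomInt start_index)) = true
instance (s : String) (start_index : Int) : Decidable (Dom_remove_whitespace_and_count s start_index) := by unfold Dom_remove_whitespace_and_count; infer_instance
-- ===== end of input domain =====

-- B replaces A's find-the-run-then-slice-and-splice with a single per-character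
-- state-machine pass over the whole string that keeps or drops each character
-- on the fly (no slicing): a genuinely different decomposition, same cost.

-- ===== PORT A =====
-- the while loop of A: state (count, end_index); stops when end_index ≥ len(s) or the char is not whitespace
-- (pyGet? = none, i.e. Python's IndexError on a negative wrapped-out index, also stops — outside Pre_).
def rwLoop (cs : List Char) (count end_index : Int) : Nat → Int × Int
  | 0 => (count, end_index)
  | fuel + 1 =>
    if end_index < (cs.length : Int) then
      match PySem.List.pyGet? cs end_index with
      | some c =>
        if PySem.Chars.isspace c then rwLoop cs (count + 1) (end_index + 1) fuel
        else (count, end_index)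
      | none => (count, end_index)
    else (count, end_index)

def remove_whitespace_and_count (s : String) (start_index : Int) : String × Int :=
  let cs := s.toList
  let r := rwLoop cs 0 start_index (((cs.length : Int) - start_index).toNat + 1)
  let count := r.1
  let end_index := r.2
  let modified_line :=
    PySem.List.slice cs none (some start_index)
      ++ PySem.Chars.replace (PySem.List.slice cs (some start_index) (some end_index)) [' '] []
      ++ PySem.List.slice cs (some end_index) none
  (String.ofList modified_line, count)

-- ===== PORT B =====
-- the body of B's for loop over enumerate(s): state (out, count, run)
def rwaStep (start_index : Int) (st : List Char × Int × Bool) (p : Int × Char) : List Char × Int × Bool :=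
  if p.1 < start_index then (st.1 ++ [p.2], st.2.1, st.2.2)
  else if st.2.2 && PySem.Chars.isspace p.2 then
    ((if p.2 ≠ ' ' then st.1 ++ [p.2] else st.1), st.2.1 + 1, st.2.2)
  else (st.1 ++ [p.2], st.2.1, false)

def remove_whitespace_and_count_alt (s : String) (start_index : Int) : String × Int :=
  let st := (PySem.List.enumerate s.toList 0).foldl (rwaStep start_index) ([], 0, true)
  (String.ofList st.1, st.2.1)

-- ===== PRECONDITION & SPEC =====
-- Pre_ restricts to the function's natural domain of non-negative start indices: for negative
-- start_index A either raises IndexError (start_index < -len(s)) or its scan relies on Python's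
-- negative-index wraparound so it can run past the end of the string — an accident, not the task.
def Pre_remove_whitespace_and_count (s : String) (start_index : Int) : Prop := 0 ≤ start_index
instance (s : String) (start_index : Int) : Decidable (Pre_remove_whitespace_and_count s start_index) := by
  unfold Pre_remove_whitespace_and_count; infer_instance

def pvWitness_remove_whitespace_and_count : String × Int := ("x  \t y", 1)

def Spec_remove_whitespace_and_count (s : String) (start_index : Int) (out : String × Int) : Prop := out = remove_whitespace_and_count_alt s start_index
instance (s : String) (start_index : Int) (out : String × Int) : Decidable (Spec_remove_whitespace_and_count s start_index out) := by unfold Spec_remove_whitespace_and_count; infer_instance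

-- ===== CLAIM (what is proved, stated in full; the proofs are below) =====
def Claim_equal_remove_whitespace_and_count : Prop := ∀ (s : String) (start_index : Int), Dom_remove_whitespace_and_count s start_index → Pre_remove_whitespace_and_count s start_index → Spec_remove_whitespace_and_count s start_index (remove_whitespace_and_count s start_index)

-- ===== LEMMAS AND PROOFS =====

-- A's loop, started at a natural index i with enough fuel, counts exactly the whitespace run of cs.drop i.
lemma rwLoop_eq (cs : List Char) (fuel : Nat) :
    ∀ (i : Nat) (count : Int), cs.length - i < fuel →
      rwLoop cs count (i : Int) fuel =
        (count + (((cs.drop i).takeWhile PySem.Chars.isspace).length : Int),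
         (i : Int) + (((cs.drop i).takeWhile PySem.Chars.isspace).length : Int)) := by
  induction fuel with
  | zero => intro i count h; omega
  | succ f ih =>
    intro i count h
    by_cases hi : i < cs.length
    · have hget : cs[i]? = some cs[i] := List.getElem?_eq_getElem hi
      have hdrop : cs.drop i = cs[i] :: cs.drop (i + 1) := List.drop_eq_getElem_cons hi
      by_cases hsp : PySem.Chars.isspace cs[i]
      · have : rwLoop cs count (i : Int) (f + 1) = rwLoop cs (count + 1) ((i : Int) + 1) f := by
          simp [rwLoop, hget, hsp, show (i : Int) < (cs.length : Int) by exact_mod_cast hi]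
        have h1 : ((i : Int) + 1) = ((i + 1 : Nat) : Int) := by push_cast; ring
        rw [this, h1, ih (i + 1) (count + 1) (by omega), hdrop,
            List.takeWhile_cons_of_pos hsp]
        simp only [Prod.mk.injEq, List.length_cons]
        constructor <;> push_cast <;> ring
      · have : rwLoop cs count (i : Int) (f + 1) = (count, (i : Int)) := by
          simp [rwLoop, hget, hsp, show (i : Int) < (cs.length : Int) by exact_mod_cast hi]
        rw [this, hdrop, List.takeWhile_cons_of_neg (by simp [hsp])]
        simp
    · have hdrop : cs.drop i = [] := List.drop_eq_nil_of_le (by omega)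
      have : rwLoop cs count (i : Int) (f + 1) = (count, (i : Int)) := by
        simp [rwLoop, show ¬ ((i : Int) < (cs.length : Int)) by exact_mod_cast hi]
      rw [this, hdrop]; simp

-- replace with old = [" "], new = "" removes exactly the spaces: the accumulator recursion of replace.go.
lemma replace_go_filter (acc : List Char) : ∀ (l : List Char),
    PySem.Chars.replace.go [' '] [] l.length l acc =
      acc.reverse ++ l.filter (· ≠ ' ') := by
  intro l
  induction l generalizing acc with
  | nil => simp [PySem.Chars.replace.go]
  | cons c t ih =>
    by_cases hc : c = ' '
    · simpa [PySem.Chars.replace.go, hc] using ih acc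
    · have : ([' '].isPrefixOf (c :: t)) = false := by
        simp [List.isPrefixOf]; exact fun h => hc h.symm
      simpa [PySem.Chars.replace.go, this, hc] using ih (c :: acc)

lemma replace_space_filter (l : List Char) :
    PySem.Chars.replace l [' '] [] = l.filter (· ≠ ' ') := by
  simpa [PySem.Chars.replace] using replace_go_filter [] l

-- Stage 1 of B's fold: indices entirely below start_index — every char is appended, state unchanged.
lemma fold_pre (start : Int) : ∀ (xs : List Char) (off : Int) (out : List Char) (cnt : Int) (run : Bool),
    off + (xs.length : Int) ≤ start →
    (PySem.List.enumerate xs off).foldl (rwaStep start) (out, cnt, run) = (out ++ xs, cnt, run) := by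
  intro xs
  induction xs with
  | nil => intro off out cnt run _; simp [PySem.List.enumerate_nil]
  | cons c t ih =>
    intro off out cnt run h
    have hlt : off < start := by simp at h; omega
    rw [PySem.List.enumerate_cons]
    simp only [List.foldl_cons, rwaStep, if_pos hlt]
    rw [ih (off + 1) (out ++ [c]) cnt run (by simp at h ⊢; omega)]
    simp

-- Stage 3: once run = false (and indices are ≥ start), every char is appended.
lemma fold_dead (start : Int) : ∀ (xs : List Char) (off : Int) (out : List Char) (cnt : Int),
    start ≤ off →
    (PySem.List.enumerate xs off).foldl (rwaStep start) (out, cnt, false) = (out ++ xs, cnt, false) := by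
  intro xs
  induction xs with
  | nil => intro off out cnt _; simp [PySem.List.enumerate_nil]
  | cons c t ih =>
    intro off out cnt h
    rw [PySem.List.enumerate_cons]
    simp only [List.foldl_cons, rwaStep, if_neg (by omega : ¬ off < start), Bool.false_and,
      Bool.false_eq_true, if_false]
    rw [ih (off + 1) (out ++ [c]) cnt (by omega)]
    simp

-- Stage 2: run = true over all-whitespace chars at indices ≥ start — spaces dropped, count incremented.
lemma fold_ws (start : Int) : ∀ (xs : List Char) (off : Int) (out : List Char) (cnt : Int),
    start ≤ off → (∀ c ∈ xs, PySem.Chars.isspace c) →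
    (PySem.List.enumerate xs off).foldl (rwaStep start) (out, cnt, true) =
      (out ++ xs.filter (· ≠ ' '), cnt + (xs.length : Int), true) := by
  intro xs
  induction xs with
  | nil => intro off out cnt _ _; simp [PySem.List.enumerate_nil]
  | cons c t ih =>
    intro off out cnt h hws
    have hc : PySem.Chars.isspace c := hws c (List.mem_cons_self ..)
    rw [PySem.List.enumerate_cons]
    simp only [List.foldl_cons, rwaStep, if_neg (by omega : ¬ off < start), Bool.true_and, hc,
      if_true]
    rw [ih (off + 1) _ (cnt + 1) (by omega) (fun d hd => hws d (List.mem_cons_of_mem _ hd))]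
    by_cases hcs : c = ' '
    · simp [hcs]; ring
    · simp [hcs]; ring

-- Stage 2+3 combined: from run = true at offset ≥ start, the fold over ws ++ tl
-- (ws all whitespace, tl not starting with whitespace) drops spaces of ws and keeps tl.
lemma fold_tail (start : Int) (xs : List Char) (off : Int) (out : List Char) (cnt : Int)
    (h : start ≤ off) (hhd : ∀ c, xs.head? = some c → ¬ PySem.Chars.isspace c) :
    (PySem.List.enumerate xs off).foldl (rwaStep start) (out, cnt, true) = (out ++ xs, cnt, true) ∨
    (PySem.List.enumerate xs off).foldl (rwaStep start) (out, cnt, true) = (out ++ xs, cnt, false) := by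
  cases xs with
  | nil => left; simp [PySem.List.enumerate_nil]
  | cons c t =>
    right
    have hc : ¬ PySem.Chars.isspace c := hhd c rfl
    rw [PySem.List.enumerate_cons]
    simp only [List.foldl_cons, rwaStep, if_neg (by omega : ¬ off < start), Bool.true_and, hc,
      Bool.false_eq_true, if_false]
    rw [fold_dead start t (off + 1) (out ++ [c]) cnt (by omega)]
    simp

-- the head of dropWhile does not satisfy the predicate
lemma head?_dropWhile_false {α : Type} {p : α → Bool} :
    ∀ (l : List α) (c : α), (l.dropWhile p).head? = some c → p c = false := by
  intro l
  induction l with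
  | nil => intro c h; simp at h
  | cons a t ih =>
    intro c h
    by_cases ha : p a
    · rw [List.dropWhile_cons_of_pos ha] at h; exact ih c h
    · rw [List.dropWhile_cons_of_neg ha] at h
      simp at h; subst h; simpa using ha

-- B's fold computes take i ++ (spaces removed from the whitespace run at i) ++ rest, and the run length.
lemma fold_main (cs : List Char) (i : Nat) :
    ((PySem.List.enumerate cs 0).foldl (rwaStep (i : Int)) ([], 0, true)).1 =
      cs.take i ++ ((cs.drop i).takeWhile PySem.Chars.isspace).filter (· ≠ ' ')
        ++ (cs.drop i).dropWhile PySem.Chars.isspace ∧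
    ((PySem.List.enumerate cs 0).foldl (rwaStep (i : Int)) ([], 0, true)).2.1 =
      (((cs.drop i).takeWhile PySem.Chars.isspace).length : Int) := by
  by_cases hil : i ≤ cs.length
  · set ws := (cs.drop i).takeWhile PySem.Chars.isspace with hws
    set tl := (cs.drop i).dropWhile PySem.Chars.isspace with htl
    have hsplit : cs = cs.take i ++ (ws ++ tl) := by
      rw [hws, htl, List.takeWhile_append_dropWhile, List.take_append_drop]
    have hlen : (cs.take i).length = i := List.length_take_of_le hil
    have henum : PySem.List.enumerate cs 0 =
        PySem.List.enumerate (cs.take i) 0 ++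
          (PySem.List.enumerate ws (0 + (i : Int)) ++
           PySem.List.enumerate tl (0 + (i : Int) + (ws.length : Int))) := by
      conv_lhs => rw [hsplit]
      rw [PySem.List.enumerate_append, PySem.List.enumerate_append, hlen]
    have hhd : ∀ c, tl.head? = some c → ¬ PySem.Chars.isspace c := by
      intro c hc
      have := head?_dropWhile_false (cs.drop i) c hc
      simp [this]
    rw [henum, List.foldl_append, List.foldl_append,
        fold_pre (i : Int) (cs.take i) 0 [] 0 true (by simp [hlen]),
        fold_ws (i : Int) ws (0 + (i : Int)) ([] ++ cs.take i) 0 (by omega)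
          (fun c hc => List.mem_takeWhile_imp hc)]
    rcases fold_tail (i : Int) tl (0 + (i : Int) + (ws.length : Int))
        (([] ++ cs.take i) ++ ws.filter (· ≠ ' ')) (0 + (ws.length : Int))
        (by omega) hhd with h | h <;>
      · rw [h]; simp
  · have hd : cs.drop i = [] := List.drop_eq_nil_of_le (by omega)
    have := fold_pre (i : Int) cs 0 [] 0 true (by simp; omega)
    rw [this, hd]
    simp [List.take_of_length_le (by omega : cs.length ≤ i)]

-- ===== VERDICT (by name: the statement is the Claim_ definition above) =====
theorem remove_whitespace_and_count_spec : Claim_equal_remove_whitespace_and_count := by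
  intro s start_index _ hpre
  unfold Spec_remove_whitespace_and_count
  unfold remove_whitespace_and_count remove_whitespace_and_count_alt
  dsimp only
  obtain ⟨i, rfl⟩ : ∃ i : Nat, start_index = (i : Int) :=
    ⟨start_index.toNat, (Int.toNat_of_nonneg hpre).symm⟩
  have hfuel : s.toList.length - i < (((s.toList.length : Int)) - (i : Int)).toNat + 1 := by omega
  rw [rwLoop_eq s.toList _ i 0 hfuel]
  obtain ⟨h1, h2⟩ := fold_main s.toList i
  refine Prod.ext ?_ (by simp [h2])
  rw [h1]
  have hmid : PySem.List.slice s.toList (some (i : Int))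
      (some ((i : Int) + (((s.toList.drop i).takeWhile PySem.Chars.isspace).length : Int))) =
      (s.toList.drop i).take ((s.toList.drop i).takeWhile PySem.Chars.isspace).length :=
    PySem.List.slice_natCast_add s.toList i _
  have htail : PySem.List.slice s.toList
      (some ((i : Int) + (((s.toList.drop i).takeWhile PySem.Chars.isspace).length : Int))) none =
      (s.toList.drop i).drop ((s.toList.drop i).takeWhile PySem.Chars.isspace).length := by
    have h3 : (i : Int) + (((s.toList.drop i).takeWhile PySem.Chars.isspace).length : Int) =
        ((i + ((s.toList.drop i).takeWhile PySem.Chars.isspace).length : Nat) : Int) := by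
      push_cast; ring
    rw [h3, PySem.List.slice_from_natCast s.toList _, ← List.drop_drop]
  have hdw : (s.toList.drop i).dropWhile PySem.Chars.isspace =
      (s.toList.drop i).drop ((s.toList.drop i).takeWhile PySem.Chars.isspace).length := by
    conv_lhs =>
      rw [show (s.toList.drop i).dropWhile PySem.Chars.isspace =
        ((s.toList.drop i).takeWhile PySem.Chars.isspace ++
         (s.toList.drop i).dropWhile PySem.Chars.isspace).drop
          ((s.toList.drop i).takeWhile PySem.Chars.isspace).length from
          (List.drop_left (l₁ := (s.toList.drop i).takeWhile PySem.Chars.isspace)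
            (l₂ := (s.toList.drop i).dropWhile PySem.Chars.isspace)).symm]
    rw [List.takeWhile_append_dropWhile]
  dsimp only
  rw [PySem.List.slice_to_natCast, hmid, htail, replace_space_filter,
      ← List.prefix_iff_eq_take.mp (List.takeWhile_prefix _), hdw]
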